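-- pv_equiv track=rewrite | github.com/prizmatik666/UFOWARrip | core/video_harvester.py | parsed_row_type
-- ===== SOURCE A (Python) =====
-- def parsed_row_type(row):
--     cells = row.get("cells") or []
--
--     for cell in reversed(cells):
--         value = (cell or "").strip().upper()
--         if value.startswith("[.") and value.endswith("]"):
--             return value.strip("[]")
--         if value.startswith(".") and len(value) <= 8:
--             return value
--
--     return ""
-- ===== SOURCE B (Python) =====
-- def parsed_row_type(row):
--     result = ""
--     for cell in (row.get("cells") or []):
--         value = (cell or "").strip().upper()
--         if value.startswith("[.") and value.endswith("]"):
--             result = value.strip("[]")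
--         elif value.startswith(".") and len(value) <= 8:
--             result = value
--     return result
-- ===== Notes on version B (the rewrite author's own statement) =====
-- stated objective: alternative
-- what changed: Replaces the reverse scan with early return by a single forward pass keeping an accumulator that later matches overwrite, returning it after the whole list is scanned.
import Mathlib
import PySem

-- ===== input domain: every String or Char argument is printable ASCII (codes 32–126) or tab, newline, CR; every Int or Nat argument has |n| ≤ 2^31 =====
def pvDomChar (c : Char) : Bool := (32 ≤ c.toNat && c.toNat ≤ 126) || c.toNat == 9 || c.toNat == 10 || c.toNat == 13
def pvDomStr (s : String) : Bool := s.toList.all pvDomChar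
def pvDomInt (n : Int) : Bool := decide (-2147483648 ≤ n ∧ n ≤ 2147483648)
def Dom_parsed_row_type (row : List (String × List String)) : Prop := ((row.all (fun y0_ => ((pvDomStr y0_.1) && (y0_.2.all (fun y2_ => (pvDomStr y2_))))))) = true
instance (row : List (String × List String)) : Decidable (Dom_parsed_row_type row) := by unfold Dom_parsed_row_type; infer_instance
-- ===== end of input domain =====

-- B replaces A's reverse scan with early return by one forward pass whose accumulator later matches overwrite (alternative decomposition, same cost).


-- ===== PORT A =====
-- 'for cell in reversed(cells): … return …' as structural recursion over cells.reverse
def pvGoA : List String → String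
  | [] => ""
  | cell :: rest =>
    -- value = (cell or "").strip().upper()   ('cell or ""' is the identity on strings here: "" stays "")
    let value := PySem.Str.upper (PySem.Str.strip cell)
    if PySem.Str.startswith value "[." && PySem.Str.endswith value "]" then
      PySem.Str.stripChars value "[]"
    else if PySem.Str.startswith value "." && decide (PySem.Str.len value ≤ 8) then
      value
    else pvGoA rest

def parsed_row_type (row : List (String × List String)) : String :=
  -- cells = row.get("cells") or []
  let cells := ((PySem.Dict.mk row).get? "cells").getD []
  pvGoA cells.reverse

-- ===== PORT B =====
def parsed_row_type_alt (row : List (String × List String)) : String :=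
  (((PySem.Dict.mk row).get? "cells").getD []).foldl
    (fun result cell =>
      let value := PySem.Str.upper (PySem.Str.strip cell)
      if PySem.Str.startswith value "[." && PySem.Str.endswith value "]" then
        PySem.Str.stripChars value "[]"
      else if PySem.Str.startswith value "." && decide (PySem.Str.len value ≤ 8) then
        value
      else result) ""

-- ===== PRECONDITION & SPEC =====
def Spec_parsed_row_type (row : List (String × List String)) (out : String) : Prop := out = parsed_row_type_alt row
instance (row : List (String × List String)) (out : String) : Decidable (Spec_parsed_row_type row out) := by unfold Spec_parsed_row_type; infer_instance

-- ===== CLAIM (what is proved, stated in full; the proofs are below) =====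
def Claim_equal_parsed_row_type : Prop := ∀ (row : List (String × List String)), Dom_parsed_row_type row → Spec_parsed_row_type row (parsed_row_type row)

-- ===== LEMMAS AND PROOFS =====

-- the per-cell match both programs test, as an Option
def pvHit (cell : String) : Option String :=
  let value := PySem.Str.upper (PySem.Str.strip cell)
  if PySem.Str.startswith value "[." && PySem.Str.endswith value "]" then
    some (PySem.Str.stripChars value "[]")
  else if PySem.Str.startswith value "." && decide (PySem.Str.len value ≤ 8) then
    some value
  else none

theorem pvGoA_eq_findSome? (l : List String) : pvGoA l = (l.findSome? pvHit).getD "" := by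
  induction l with
  | nil => rfl
  | cons c t ih =>
    simp only [pvGoA, pvHit, List.findSome?_cons]
    split_ifs <;> simp [ih]

theorem pvStep_eq (acc cell : String) :
    (let value := PySem.Str.upper (PySem.Str.strip cell)
     if PySem.Str.startswith value "[." && PySem.Str.endswith value "]" then
       PySem.Str.stripChars value "[]"
     else if PySem.Str.startswith value "." && decide (PySem.Str.len value ≤ 8) then
       value
     else acc) = (pvHit cell).getD acc := by
  simp only [pvHit]
  split_ifs <;> rfl

theorem pvFoldl_eq (l : List String) (acc : String) :
    l.foldl
      (fun result cell =>
        let value := PySem.Str.upper (PySem.Str.strip cell)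
        if PySem.Str.startswith value "[." && PySem.Str.endswith value "]" then
          PySem.Str.stripChars value "[]"
        else if PySem.Str.startswith value "." && decide (PySem.Str.len value ≤ 8) then
          value
        else result) acc = (l.reverse.findSome? pvHit).getD acc := by
  induction l generalizing acc with
  | nil => rfl
  | cons c t ih =>
    rw [List.foldl_cons, ih, List.reverse_cons, List.findSome?_append, pvStep_eq]
    cases h : t.reverse.findSome? pvHit <;>
      cases h2 : pvHit c <;>
        simp [h2, List.findSome?_nil, Option.or]

-- ===== VERDICT (by name: the statement is the Claim_ definition above) =====
theorem parsed_row_type_spec : Claim_equal_parsed_row_type := by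
  intro row _
  show parsed_row_type row = parsed_row_type_alt row
  simp only [parsed_row_type, parsed_row_type_alt, pvGoA_eq_findSome?, pvFoldl_eq]
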